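-- pv_equiv track=rewrite | github.com/pypi-data/pypi-mirror-57 | packages/rtsf/rtsf-2.9.4.tar.gz/rtsf-2.9.4/rtsf/p_common.py | seqfy
-- ===== SOURCE A (Python) =====
-- def seqfy(strs):
--     ''' 序列化 字符串--->实际效果是，为字符串，添加行号，返回字符串
--     Sampe usage:
--         strs = ["", None, u"First-line\nSecond-line\nThird-line", u"没有换行符"]
--         for s in strs:
--             print "---"
--             result = seqfy(s)
--             print result
--             print unseqfy(result)
--     '''
--
--     if not strs:
--         return
--
--     result = ""
--     seq = 1
--     ss = strs.split("\n")
--     for i in ss: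
--         if i:
--             result = "".join([result, str(seq), ".", i, "\n"])
--             seq = seq + 1
--     return result
-- ===== SOURCE B (Python) =====
-- def seqfy(strs):
--     # Single character-scan state machine: no split(), numbers are inserted at
--     # the start of each non-empty line as the characters stream by.
--     if not strs:
--         return
--     out = []
--     seq = 1
--     at_start = True
--     for ch in strs:
--         if ch == "\n":
--             if not at_start:
--                 out.append("\n")
--                 at_start = True
--         else:
--             if at_start:
--                 out.append(str(seq))
--                 out.append(".")
--                 seq += 1
--                 at_start = False
--             out.append(ch)
--     if not at_start:
--         out.append("\n")
--     return "".join(out)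
-- ===== Notes on version B (the rewrite author's own statement) =====
-- stated objective: alternative
-- what changed: Replaces A's split-into-lines loop that re-joins the whole result string on every numbered line by a single character-scan state machine (no split) that streams pieces into a list and joins once.
import Mathlib
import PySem

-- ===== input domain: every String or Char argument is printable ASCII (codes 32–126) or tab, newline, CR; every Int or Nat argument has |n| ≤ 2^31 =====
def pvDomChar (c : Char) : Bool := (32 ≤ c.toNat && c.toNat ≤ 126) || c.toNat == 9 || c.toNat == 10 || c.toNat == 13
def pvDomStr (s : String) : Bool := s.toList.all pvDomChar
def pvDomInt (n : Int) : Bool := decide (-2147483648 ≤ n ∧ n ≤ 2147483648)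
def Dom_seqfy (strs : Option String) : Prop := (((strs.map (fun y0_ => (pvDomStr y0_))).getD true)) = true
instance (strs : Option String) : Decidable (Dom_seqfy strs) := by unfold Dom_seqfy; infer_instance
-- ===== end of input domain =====

-- B numbers the non-empty lines with a single character-scan state machine (no split;
-- pieces collected in a list and joined once) instead of A's per-line loop that
-- re-joins the whole result string on every numbered line.

-- ===== PORT A =====
def seqfy (strs : Option String) : Option String :=
  match strs with
  | none => none
  | some s =>
    if s = "" then none        -- 'if not strs: return'
    else
      match PySem.Str.split? s "\n" with
      | none => none           -- unreachable: the separator "\n" is non-empty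
      | some ss =>
        let st := ss.foldl (fun (acc : String × Int) i =>
          if i ≠ "" then
            (PySem.Str.join "" [acc.1, PySem.Int.toStr acc.2, ".", i, "\n"], acc.2 + 1)
          else acc) ("", 1)
        some st.1

-- ===== PORT B =====
-- one step of Source B's loop body; state = (out pieces, seq, at_start)
def seqfyAltStep (acc : List String × Int × Bool) (ch : Char) : List String × Int × Bool :=
  if ch = '\n' then
    if acc.2.2 = false then (acc.1 ++ ["\n"], acc.2.1, true) else acc
  else
    let acc1 := if acc.2.2 then (acc.1 ++ [PySem.Int.toStr acc.2.1, "."], acc.2.1 + 1, false) else acc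
    (acc1.1 ++ [String.singleton ch], acc1.2.1, false)

def seqfy_alt (strs : Option String) : Option String :=
  match strs with
  | none => none
  | some s =>
    if s = "" then none        -- 'if not strs: return'
    else
      let st := s.toList.foldl seqfyAltStep ([], 1, true)
      let st := if st.2.2 = false then (st.1 ++ ["\n"], st.2.1, true) else st
      some (PySem.Str.join "" st.1)

-- ===== PRECONDITION & SPEC =====
def Spec_seqfy (strs : Option String) (out : Option String) : Prop := out = seqfy_alt strs
instance (strs : Option String) (out : Option String) : Decidable (Spec_seqfy strs out) := by unfold Spec_seqfy; infer_instance

-- ===== CLAIM (what is proved, stated in full; the proofs are below) =====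
def Claim_equal_seqfy : Prop := ∀ (strs : Option String), Dom_seqfy strs → Spec_seqfy strs (seqfy strs)

-- ===== LEMMAS AND PROOFS =====

-- A's loop body, named for the proofs (definitionally the lambda in seqfy).
def pvAStep (acc : String × Int) (i : String) : String × Int :=
  if i ≠ "" then
    (PySem.Str.join "" [acc.1, PySem.Int.toStr acc.2, ".", i, "\n"], acc.2 + 1)
  else acc

-- Chars.join with the empty separator is flatten.
theorem charsJoin_nil_eq_flatten (l : List (List Char)) :
    PySem.Chars.join [] l = l.flatten := by
  induction l with
  | nil => simp [PySem.Chars.join_nil]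
  | cons a t ih =>
    cases t with
    | nil => simp [PySem.Chars.join_singleton]
    | cons b r => simp [PySem.Chars.join_cons_cons, ih]

-- the flattened text of a piece list
def pvFlat (out : List String) : List Char := (out.map String.toList).flatten

theorem pvFlat_singletons (a : List Char) :
    (List.map (String.toList ∘ String.singleton) a).flatten = a := by
  have : (List.map (String.toList ∘ String.singleton) a) = a.map (fun c => [c]) := by
    simp [Function.comp, String.singleton]
  rw [this, ← charsJoin_nil_eq_flatten]
  exact PySem.Chars.join_nil_singletons a

-- PySem's splitOn on the one-character separator ['\n'] is Mathlib's List.splitOn '\n'.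
theorem pvGo_splitOn (fuel : Nat) (l : List Char) (cur : List Char) (acc : List (List Char))
    (h : l.length < fuel) :
    PySem.Chars.splitOn.go ['\n'] fuel l cur acc
      = acc.reverse ++ (l.splitOn '\n').modifyHead (cur.reverse ++ ·) := by
  induction fuel generalizing l cur acc with
  | zero => omega
  | succ f ih =>
    cases l with
    | nil =>
      simp [PySem.Chars.splitOn.go, List.splitOn, List.splitOnP_nil]
    | cons c rest =>
      by_cases hc : c = '\n'
      · subst hc
        have hpre : List.isPrefixOf ['\n'] ('\n' :: rest) = true := by
          simp [List.isPrefixOf]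
        rw [PySem.Chars.splitOn.go]
        simp only [hpre, if_pos]
        rw [ih _ _ _ (by simpa using h)]
        simp only [List.splitOn, List.splitOnP_cons, beq_self_eq_true, if_pos,
          List.modifyHead_cons, List.reverse_cons, List.reverse_nil, List.nil_append]
        simp [show (fun x : List Char => x) = id from rfl, List.modifyHead_id]
      · have hpre : List.isPrefixOf ['\n'] (c :: rest) = false := by
          simp only [List.isPrefixOf, List.isPrefixOf_nil_left, Bool.and_true, beq_eq_false_iff_ne,
            ne_eq]
          exact fun e => hc e.symm
        rw [PySem.Chars.splitOn.go]
        simp only [hpre, Bool.false_eq_true, if_false]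
        rw [ih _ _ _ (by simpa using h)]
        have hne := List.splitOnP_ne_nil (fun x => x == '\n') rest
        simp only [List.splitOn] at *
        cases hs : rest.splitOnP (fun x => x == '\n') with
        | nil => exact absurd hs hne
        | cons hd tl =>
          simp [List.splitOnP_cons, hc, hs, List.modifyHead]

theorem pvSplitOn_eq (cs : List Char) :
    PySem.Chars.splitOn cs ['\n'] = cs.splitOn '\n' := by
  rw [PySem.Chars.splitOn, pvGo_splitOn (cs.length + 1) cs [] [] (by omega)]
  have hne := List.splitOnP_ne_nil (fun x => x == '\n') cs
  simp only [List.splitOn] at *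
  cases hs : cs.splitOnP (fun x => x == '\n') with
  | nil => exact absurd hs hne
  | cons hd tl => simp [List.modifyHead]

-- pieces of splitOn '\n' contain no '\n'
theorem pvSplitOn_no_sep (cs : List Char) :
    ∀ l ∈ cs.splitOn '\n', '\n' ∉ l := by
  induction cs with
  | nil => simp [List.splitOn, List.splitOnP_nil]
  | cons c rest ih =>
    intro l hl
    by_cases hc : c = '\n'
    · subst hc
      rw [List.splitOn, List.splitOnP_cons] at hl
      simp only [beq_self_eq_true, if_pos, List.mem_cons] at hl
      rcases hl with h | h
      · simp [h]
      · exact ih l (by simpa [List.splitOn] using h)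
    · rw [List.splitOn, List.splitOnP_cons] at hl
      have hb : (c == '\n') = false := by simp [hc]
      rw [hb] at hl
      simp only [Bool.false_eq_true, if_false] at hl
      obtain ⟨hd, tl, hs⟩ : ∃ hd tl, rest.splitOnP (fun x => x == '\n') = hd :: tl := by
        cases h' : rest.splitOnP (fun x => x == '\n') with
        | nil => exact absurd h' (List.splitOnP_ne_nil _ rest)
        | cons x y => exact ⟨x, y, rfl⟩
      rw [hs] at hl
      simp only [List.modifyHead_cons, List.mem_cons] at hl
      rcases hl with h | h
      · subst h
        intro hmem
        rcases List.mem_cons.mp hmem with h' | h'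
        · exact hc h'.symm
        · exact ih hd (by simp [List.splitOn, hs]) h'
      · exact ih l (by simp [List.splitOn, hs, h])

-- B's loop over a '\n'-free tail with at_start = false just appends the characters.
theorem pvRun_noLF (cs : List Char) (out : List String) (q : Int) (h : '\n' ∉ cs) :
    cs.foldl seqfyAltStep (out, q, false) = (out ++ cs.map String.singleton, q, false) := by
  induction cs generalizing out with
  | nil => simp
  | cons c rest ih =>
    have hc : c ≠ '\n' := by intro e; exact h (by simp [e])
    have h2 : '\n' ∉ rest := by intro hm; exact h (by simp [hm])
    simp only [List.foldl_cons]
    rw [show seqfyAltStep (out, q, false) c = (out ++ [String.singleton c], q, false) by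
      simp [seqfyAltStep, hc]]
    rw [ih _ h2]
    simp

-- B's loop over one non-empty '\n'-free line starting a line
theorem pvRun_line (a : List Char) (out : List String) (q : Int)
    (h : '\n' ∉ a) (ha : a ≠ []) :
    a.foldl seqfyAltStep (out, q, true)
      = (out ++ [PySem.Int.toStr q, "."] ++ a.map String.singleton, q + 1, false) := by
  cases a with
  | nil => exact absurd rfl ha
  | cons c rest =>
    have hc : c ≠ '\n' := by intro e; exact h (by simp [e])
    have h2 : '\n' ∉ rest := by intro hm; exact h (by simp [hm])
    simp only [List.foldl_cons]
    rw [show seqfyAltStep (out, q, true) c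
        = (out ++ [PySem.Int.toStr q, "."] ++ [String.singleton c], q + 1, false) by
      simp [seqfyAltStep, hc]]
    rw [pvRun_noLF _ _ _ h2]
    simp

-- B's end-of-loop fixup: append the final newline if inside a line.
def pvFix (st : List String × Int × Bool) : List String × Int × Bool :=
  if st.2.2 = false then (st.1 ++ ["\n"], st.2.1, true) else st

theorem pvFix_false (st : List String × Int × Bool) (h : st.2.2 = false) :
    pvFix st = (st.1 ++ ["\n"], st.2.1, true) := by simp [pvFix, h]

theorem pvFix_true (st : List String × Int × Bool) (h : st.2.2 = true) :
    pvFix st = st := by simp [pvFix, h]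

-- B's loop over the '\n'-joined line list, followed by the final-newline fixup,
-- produces exactly A's fold over the same lines.
theorem pvRun_lines (ls : List (List Char)) (h : ∀ l ∈ ls, '\n' ∉ l)
    (out : List String) (q : Int) :
    pvFlat (pvFix ((List.intercalate ['\n'] ls).foldl seqfyAltStep (out, q, true))).1
      = ((ls.map String.ofList).foldl pvAStep (String.ofList (pvFlat out), q)).1.toList := by
  induction ls generalizing out q with
  | nil =>
    rw [show List.intercalate ['\n'] ([] : List (List Char)) = [] from by
      simp [List.intercalate]]
    simp only [List.foldl_nil, List.map_nil]
    rw [pvFix_true _ rfl]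
    simp
  | cons a t ih =>
    have ha := h a (List.mem_cons_self)
    have ht : ∀ l ∈ t, '\n' ∉ l := fun l hl => h l (List.mem_cons_of_mem _ hl)
    cases t with
    | nil =>
      by_cases he : a = []
      · subst he
        rw [show List.intercalate ['\n'] [([] : List Char)] = [] from by
          simp [List.intercalate]]
        simp only [List.foldl_nil, List.map_cons, List.map_nil, List.foldl_cons]
        rw [pvFix_true _ rfl]
        simp [pvAStep]
      · have hmk : String.ofList a ≠ "" := by
          intro e
          exact he (by simpa using congrArg String.toList e)
        rw [show List.intercalate ['\n'] [a] = a from by simp [List.intercalate],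
          pvRun_line a out q ha he, pvFix_false _ rfl]
        simp only [List.map_cons, List.map_nil, List.foldl_cons, List.foldl_nil]
        rw [show pvAStep (String.ofList (pvFlat out), q) (String.ofList a)
            = (PySem.Str.join "" [String.ofList (pvFlat out), PySem.Int.toStr q, ".",
                String.ofList a, "\n"], q + 1) from by simp [pvAStep, hmk]]
        rw [PySem.Str.toList_join, show ("" : String).toList = [] from rfl,
          charsJoin_nil_eq_flatten]
        simp [pvFlat_singletons, pvFlat]
    | cons b t' =>
      have hint : List.intercalate ['\n'] (a :: b :: t')
          = a ++ '\n' :: List.intercalate ['\n'] (b :: t') := by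
        simp [List.intercalate, List.intersperse_cons₂]
      rw [hint]
      by_cases he : a = []
      · subst he
        simp only [List.nil_append, List.foldl_cons]
        rw [show seqfyAltStep (out, q, true) '\n' = (out, q, true) from by
          simp [seqfyAltStep]]
        rw [ih ht out q]
        simp [pvAStep]
      · have hmk : String.ofList a ≠ "" := by
          intro e
          exact he (by simpa using congrArg String.toList e)
        rw [List.foldl_append, pvRun_line a out q ha he]
        simp only [List.foldl_cons]
        rw [show seqfyAltStep
              (out ++ [PySem.Int.toStr q, "."] ++ a.map String.singleton, q + 1, false) '\n'
            = (out ++ [PySem.Int.toStr q, "."] ++ a.map String.singleton ++ ["\n"], q + 1, true)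
            from by simp [seqfyAltStep]]
        rw [ih ht _ (q + 1)]
        simp only [List.map_cons, List.foldl_cons]
        rw [show pvAStep (String.ofList (pvFlat out), q) (String.ofList a)
            = (PySem.Str.join "" [String.ofList (pvFlat out), PySem.Int.toStr q, ".",
                String.ofList a, "\n"], q + 1) from by simp [pvAStep, hmk]]
        have hstr : String.ofList
              (pvFlat (out ++ [PySem.Int.toStr q, "."] ++ a.map String.singleton ++ ["\n"]))
            = PySem.Str.join "" [String.ofList (pvFlat out), PySem.Int.toStr q, ".",
                String.ofList a, "\n"] := by
          apply String.toList_inj.mp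
          rw [String.toList_ofList, PySem.Str.toList_join,
            show ("" : String).toList = [] from rfl, charsJoin_nil_eq_flatten]
          simp [pvFlat_singletons, pvFlat]
        rw [← hstr]

-- ===== VERDICT (by name: the statement is the Claim_ definition above) =====
theorem seqfy_spec : Claim_equal_seqfy := by
  intro strs _
  unfold Spec_seqfy seqfy seqfy_alt
  cases strs with
  | none => rfl
  | some s =>
    by_cases hs : s = ""
    · simp [hs]
    · simp only [hs, ite_false]
      cases hsplit : PySem.Str.split? s "\n" with
      | none =>
        exfalso
        have := PySem.Str.split?_map s "\n"
        rw [hsplit] at this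
        simp [PySem.Chars.split?] at this
      | some ss =>
        have hmap : ss.map String.toList = s.toList.splitOn '\n' := by
          have := PySem.Str.split?_map s "\n"
          rw [hsplit] at this
          simp only [Option.map_some] at this
          rw [← pvSplitOn_eq]
          have h2 : PySem.Chars.split? s.toList "\n".toList
              = some (PySem.Chars.splitOn s.toList "\n".toList) := by
            simp [PySem.Chars.split?]
          rw [h2] at this
          simpa using this
        have hls : (ss.map String.toList).map String.ofList = ss := by
          simp [List.map_map, Function.comp_def, String.ofList_toList]
        have hinter : List.intercalate ['\n'] (ss.map String.toList) = s.toList := by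
          rw [hmap]; exact List.intercalate_splitOn (xs := s.toList) '\n'
        have hkey := pvRun_lines (ss.map String.toList)
          (by rw [hmap]; exact pvSplitOn_no_sep s.toList) [] 1
        rw [hls, hinter] at hkey
        simp only [Option.some.injEq]
        apply String.toList_inj.mp
        rw [PySem.Str.toList_join,
          show ("" : String).toList = [] from rfl, charsJoin_nil_eq_flatten]
        exact hkey.symm
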